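-- pv_equiv track=rewrite | github.com/shang-vikas/ml-fastvlm | core_fastvlm_engine.py | tag_from_text
-- ===== SOURCE A (Python) =====
-- from typing import Any, Dict, List, Tuple, Optional
--
-- def tag_from_text(text: str) -> Tuple[List[str], List[str], List[str]]:
--     """
--     Lightweight heuristic tagger used for MVP.
--     Returns (visual_tags, vibe_tags, safety_flags).
--     """
--     text_l = (text or "").lower()
--     visual_tags: List[str] = []
--     vibe_tags: List[str] = []
--     safety_flags: List[str] = []
--
--     if any(w in text_l for w in ["gym", "workout", "exercise", "lift", "squat"]):
--         visual_tags.append("gym")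
--     if any(w in text_l for w in ["beach", "ocean", "sea"]):
--         visual_tags.append("beach")
--     if any(w in text_l for w in ["office", "meeting", "laptop"]):
--         visual_tags.append("office")
--     if any(w in text_l for w in ["travel", "trip", "flight", "airport"]):
--         visual_tags.append("travel")
--     if any(w in text_l for w in ["food", "recipe", "cook", "cooking"]):
--         visual_tags.append("food")
--     if any(w in text_l for w in ["dog", "cat", "pet"]):
--         visual_tags.append("pets")
--
--     if any(w in text_l for w in ["tutorial", "how to", "guide", "tips"]):
--         vibe_tags.append("educational")
--     if any(w in text_l for w in ["motivational", "inspiring", "inspiration"]):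
--         vibe_tags.append("motivational")
--     if any(w in text_l for w in ["funny", "lol", "joke", "meme"]):
--         vibe_tags.append("funny")
--
--     if any(w in text_l for w in ["blood", "gun", "fight", "kill"]):
--         safety_flags.append("violence")
--     if any(w in text_l for w in ["nude", "sexual", "nsfw"]):
--         safety_flags.append("sexual")
--
--     return visual_tags, vibe_tags, safety_flags
-- ===== SOURCE B (Python) =====
-- from typing import List, Tuple
--
-- _RULES = [
--     ("gym", ["gym", "workout", "exercise", "lift", "squat"]),
--     ("beach", ["beach", "ocean", "sea"]),
--     ("office", ["office", "meeting", "laptop"]),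
--     ("travel", ["travel", "trip", "flight", "airport"]),
--     ("food", ["food", "recipe", "cook", "cooking"]),
--     ("pets", ["dog", "cat", "pet"]),
--     ("educational", ["tutorial", "how to", "guide", "tips"]),
--     ("motivational", ["motivational", "inspiring", "inspiration"]),
--     ("funny", ["funny", "lol", "joke", "meme"]),
--     ("violence", ["blood", "gun", "fight", "kill"]),
--     ("sexual", ["nude", "sexual", "nsfw"]),
-- ]
-- # one flat keyword -> tag stream, in rule order
-- _FLAT = [(kw, tag) for tag, kws in _RULES for kw in kws]
-- _VISUAL = {"gym", "beach", "office", "travel", "food", "pets"}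
-- _VIBE = {"educational", "motivational", "funny"}
-- _SAFETY = {"violence", "sexual"}
--
-- def tag_from_text(text: str) -> Tuple[List[str], List[str], List[str]]:
--     """Single flat keyword pass with dedup, then partition hits by category."""
--     t = (text or "").lower()
--     hits: List[str] = []
--     for kw, tag in _FLAT:
--         if kw in t and tag not in hits:
--             hits.append(tag)
--     return ([x for x in hits if x in _VISUAL],
--             [x for x in hits if x in _VIBE],
--             [x for x in hits if x in _SAFETY])
-- ===== Notes on version B (the rewrite author's own statement) =====
-- stated objective: alternative
-- what changed: Instead of eleven per-category if/any/append blocks, B makes a single flat pass over one keyword->tag stream with a dedup accumulator of hit tags and then partitions the hits into the three categories by tag-set membership.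
import Mathlib
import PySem

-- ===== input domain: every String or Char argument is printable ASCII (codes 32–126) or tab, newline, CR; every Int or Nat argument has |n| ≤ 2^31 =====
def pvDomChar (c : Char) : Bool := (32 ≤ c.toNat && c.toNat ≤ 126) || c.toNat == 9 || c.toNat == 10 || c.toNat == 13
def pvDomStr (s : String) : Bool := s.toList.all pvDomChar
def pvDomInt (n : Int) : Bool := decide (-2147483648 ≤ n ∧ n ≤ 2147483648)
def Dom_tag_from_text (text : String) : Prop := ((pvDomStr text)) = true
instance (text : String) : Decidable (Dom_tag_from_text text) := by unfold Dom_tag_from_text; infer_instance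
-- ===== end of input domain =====

-- B replaces A's eleven if/append blocks by a single flat keyword pass with a dedup
-- accumulator, then partitions the hit tags by category (objective: alternative).

-- ===== PORT A =====
def tag_from_text (text : String) : List String × List String × List String :=
  let text_l := PySem.Str.lower (if text = "" then "" else text)
  let visual_tags : List String := []
  let vibe_tags : List String := []
  let safety_flags : List String := []
  let visual_tags := if (["gym", "workout", "exercise", "lift", "squat"].any (fun w => PySem.Str.isIn w text_l)) then visual_tags ++ ["gym"] else visual_tags
  let visual_tags := if (["beach", "ocean", "sea"].any (fun w => PySem.Str.isIn w text_l)) then visual_tags ++ ["beach"] else visual_tags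
  let visual_tags := if (["office", "meeting", "laptop"].any (fun w => PySem.Str.isIn w text_l)) then visual_tags ++ ["office"] else visual_tags
  let visual_tags := if (["travel", "trip", "flight", "airport"].any (fun w => PySem.Str.isIn w text_l)) then visual_tags ++ ["travel"] else visual_tags
  let visual_tags := if (["food", "recipe", "cook", "cooking"].any (fun w => PySem.Str.isIn w text_l)) then visual_tags ++ ["food"] else visual_tags
  let visual_tags := if (["dog", "cat", "pet"].any (fun w => PySem.Str.isIn w text_l)) then visual_tags ++ ["pets"] else visual_tags
  let vibe_tags := if (["tutorial", "how to", "guide", "tips"].any (fun w => PySem.Str.isIn w text_l)) then vibe_tags ++ ["educational"] else vibe_tags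
  let vibe_tags := if (["motivational", "inspiring", "inspiration"].any (fun w => PySem.Str.isIn w text_l)) then vibe_tags ++ ["motivational"] else vibe_tags
  let vibe_tags := if (["funny", "lol", "joke", "meme"].any (fun w => PySem.Str.isIn w text_l)) then vibe_tags ++ ["funny"] else vibe_tags
  let safety_flags := if (["blood", "gun", "fight", "kill"].any (fun w => PySem.Str.isIn w text_l)) then safety_flags ++ ["violence"] else safety_flags
  let safety_flags := if (["nude", "sexual", "nsfw"].any (fun w => PySem.Str.isIn w text_l)) then safety_flags ++ ["sexual"] else safety_flags
  (visual_tags, vibe_tags, safety_flags)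

-- ===== PORT B =====
def allRules : List (String × List String) :=
  [("gym", ["gym", "workout", "exercise", "lift", "squat"]),
   ("beach", ["beach", "ocean", "sea"]),
   ("office", ["office", "meeting", "laptop"]),
   ("travel", ["travel", "trip", "flight", "airport"]),
   ("food", ["food", "recipe", "cook", "cooking"]),
   ("pets", ["dog", "cat", "pet"]),
   ("educational", ["tutorial", "how to", "guide", "tips"]),
   ("motivational", ["motivational", "inspiring", "inspiration"]),
   ("funny", ["funny", "lol", "joke", "meme"]),
   ("violence", ["blood", "gun", "fight", "kill"]),
   ("sexual", ["nude", "sexual", "nsfw"])]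

-- _FLAT = [(kw, tag) for tag, kws in _RULES for kw in kws]
def flatPairs : List (String × String) :=
  allRules.flatMap (fun r => r.2.map (fun k => (k, r.1)))

def visualSet : PySem.Set String := PySem.Set.ofList ["gym", "beach", "office", "travel", "food", "pets"]
def vibeSet : PySem.Set String := PySem.Set.ofList ["educational", "motivational", "funny"]
def safetySet : PySem.Set String := PySem.Set.ofList ["violence", "sexual"]

def tag_from_text_alt (text : String) : List String × List String × List String :=
  let t := PySem.Str.lower (if text = "" then "" else text)
  let hits := flatPairs.foldl
    (fun acc p => if PySem.Str.isIn p.1 t && !(acc.contains p.2) then acc ++ [p.2] else acc) []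
  (hits.filter (fun x => visualSet.contains x),
   hits.filter (fun x => vibeSet.contains x),
   hits.filter (fun x => safetySet.contains x))

-- ===== PRECONDITION & SPEC =====
def Spec_tag_from_text (text : String) (out : List String × List String × List String) : Prop := out = tag_from_text_alt text
instance (text : String) (out : List String × List String × List String) : Decidable (Spec_tag_from_text text out) := by unfold Spec_tag_from_text; infer_instance

-- ===== CLAIM (what is proved, stated in full; the proofs are below) =====
def Claim_equal_tag_from_text : Prop := ∀ (text : String), Dom_tag_from_text text → Spec_tag_from_text text (tag_from_text text)

-- ===== LEMMAS AND PROOFS =====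

-- B's dedup step over one rule's keyword segment appends the tag iff some keyword matches.
theorem scan_seg (m : String → Bool) (tag : String) (kws : List String) (acc : List String) :
    (kws.map (fun k => (k, tag))).foldl
      (fun acc p => if m p.1 && !(acc.contains p.2) then acc ++ [p.2] else acc) acc
    = if kws.any m && !(acc.contains tag) then acc ++ [tag] else acc := by
  induction kws generalizing acc with
  | nil => simp
  | cons k ks ih =>
    simp only [List.map_cons, List.foldl_cons, List.any_cons]
    by_cases hm : m k = true
    · by_cases hc : acc.contains tag = true
      · have hmem : tag ∈ acc := by simpa using hc
        rw [if_neg (by simp [hmem]), ih, if_neg (by simp [hmem]), if_neg (by simp [hmem])]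
      · have hnmem : tag ∉ acc := by simpa using hc
        rw [if_pos (by simp [hm, hnmem]), ih, if_neg (by simp), if_pos (by simp [hm, hnmem])]
    · have hm' : m k = false := by simpa using hm
      rw [if_neg (by simp [hm']), ih]
      simp only [hm', Bool.false_or]

-- chaining segments: one flat dedup pass over all rules = per-rule filterMap, for distinct tags
theorem scan_rules (m : String → Bool) (rules : List (String × List String)) (acc : List String)
    (hacc : ∀ r ∈ rules, acc.contains r.1 = false)
    (hnd : (rules.map Prod.fst).Nodup) :
    (rules.flatMap (fun r => r.2.map (fun k => (k, r.1)))).foldl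
      (fun acc p => if m p.1 && !(acc.contains p.2) then acc ++ [p.2] else acc) acc
    = acc ++ rules.filterMap (fun r => if r.2.any m then some r.1 else none) := by
  induction rules generalizing acc with
  | nil => simp
  | cons r rs ih =>
    simp only [List.flatMap_cons, List.foldl_append, List.filterMap_cons]
    rw [scan_seg]
    have hr : acc.contains r.1 = false := hacc r (by simp)
    have hr' : r.1 ∉ acc := by simpa using hr
    simp only [List.map_cons, List.nodup_cons] at hnd
    by_cases hany : r.2.any m
    · rw [if_pos (by simp [hany, hr']), if_pos hany,
        ih (acc ++ [r.1]) ?_ hnd.2]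
      · simp
      · intro r' hmem
        have h1 : r'.1 ∉ acc := by simpa using hacc r' (by simp [hmem])
        have h2 : r'.1 ≠ r.1 := by
          intro h; exact hnd.1 (h ▸ List.mem_map_of_mem hmem)
        simp [h1, h2]
    · rw [if_neg (by simp [hany]), if_neg (by simp [hany]),
        ih acc (fun r' h => hacc r' (by simp [h])) hnd.2]

-- every hit produced from a rule table is one of its tags
theorem mem_filterMap_tags (m : String → Bool) (rules : List (String × List String)) (x : String)
    (hx : x ∈ rules.filterMap (fun r => if r.2.any m then some r.1 else none)) :
    x ∈ rules.map Prod.fst := by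
  rw [List.mem_filterMap] at hx
  obtain ⟨r, hrr, hg⟩ := hx
  split at hg
  · cases hg; exact List.mem_map_of_mem hrr
  · cases hg

theorem filter_tags_self (m p : String → Bool) (rules : List (String × List String))
    (h : ∀ t ∈ rules.map Prod.fst, p t = true) :
    (rules.filterMap (fun r => if r.2.any m then some r.1 else none)).filter p
      = rules.filterMap (fun r => if r.2.any m then some r.1 else none) :=
  List.filter_eq_self.mpr (fun x hx => h x (mem_filterMap_tags m rules x hx))

theorem filter_tags_nil (m p : String → Bool) (rules : List (String × List String))
    (h : ∀ t ∈ rules.map Prod.fst, p t = false) :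
    (rules.filterMap (fun r => if r.2.any m then some r.1 else none)).filter p = [] :=
  List.filter_eq_nil_iff.mpr (fun x hx => by simp [h x (mem_filterMap_tags m rules x hx)])

def vRules : List (String × List String) := allRules.take 6
def bRules : List (String × List String) := (allRules.drop 6).take 3
def sRules : List (String × List String) := allRules.drop 9

set_option maxHeartbeats 1000000 in
theorem tag_main (text : String) : tag_from_text text = tag_from_text_alt text := by
  simp only [tag_from_text, tag_from_text_alt, flatPairs]
  set m : String → Bool := fun w => PySem.Str.isIn w (PySem.Str.lower (if text = "" then "" else text)) with hm
  rw [scan_rules m allRules [] (by simp [allRules]) (by decide)]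
  simp only [List.nil_append]
  have hsplit : allRules.filterMap (fun r => if r.2.any m then some r.1 else none)
      = vRules.filterMap (fun r => if r.2.any m then some r.1 else none)
        ++ (bRules.filterMap (fun r => if r.2.any m then some r.1 else none)
          ++ sRules.filterMap (fun r => if r.2.any m then some r.1 else none)) := by
    rw [← List.filterMap_append, ← List.filterMap_append]
    rfl
  rw [hsplit]
  refine Prod.ext ?_ (Prod.ext ?_ ?_) <;> dsimp only
  · simp only [List.filter_append]
    rw [filter_tags_self m (fun x => visualSet.contains x) vRules (by decide),
      filter_tags_nil m (fun x => visualSet.contains x) bRules (by decide),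
      filter_tags_nil m (fun x => visualSet.contains x) sRules (by decide),
      List.append_nil, List.append_nil]
    simp only [vRules, allRules, List.take, List.filterMap_cons, List.filterMap_nil]
    split_ifs <;> rfl
  · simp only [List.filter_append]
    rw [filter_tags_nil m (fun x => vibeSet.contains x) vRules (by decide),
      filter_tags_self m (fun x => vibeSet.contains x) bRules (by decide),
      filter_tags_nil m (fun x => vibeSet.contains x) sRules (by decide),
      List.append_nil, List.nil_append]
    simp only [bRules, allRules, List.take, List.drop, List.filterMap_cons, List.filterMap_nil]
    split_ifs <;> rfl
  · simp only [List.filter_append]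
    rw [filter_tags_nil m (fun x => safetySet.contains x) vRules (by decide),
      filter_tags_nil m (fun x => safetySet.contains x) bRules (by decide),
      filter_tags_self m (fun x => safetySet.contains x) sRules (by decide),
      List.nil_append, List.nil_append]
    simp only [sRules, allRules, List.drop, List.filterMap_cons, List.filterMap_nil]
    split_ifs <;> rfl

-- ===== VERDICT (by name: the statement is the Claim_ definition above) =====
theorem tag_from_text_spec : Claim_equal_tag_from_text := by
  intro text _
  exact tag_main text
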